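-- pv_equiv track=rewrite | github.com/opengauss-mirror/openGauss-server | src/gausskernel/dbmind/tools/components/index_advisor/index_advisor_workload.py | get_indexable_columns
-- ===== SOURCE A (Python) =====
-- def get_indexable_columns(table_index_dict):
--     query_indexable_columns = {}
--     if len(table_index_dict) == 0:
--         return query_indexable_columns
--
--     for table in table_index_dict.keys():
--         query_indexable_columns[table] = []
--         for columns_tuple in table_index_dict[table]:
--             indexable_columns = columns_tuple[0].split(',')
--             for column in indexable_columns:
--                 for ind, item in enumerate(query_indexable_columns[table]):
--                     if column != item[0]:
--                         continue
--                     if columns_tuple[1] == item[1]: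
--                         query_indexable_columns[table].pop(ind)
--                         break
--                 query_indexable_columns[table].append(
--                     (column, columns_tuple[1]))
--
--     return query_indexable_columns
-- ===== SOURCE B (Python) =====
-- def get_indexable_columns(table_index_dict):
--     query_indexable_columns = {}
--     if len(table_index_dict) == 0:
--         return query_indexable_columns
--
--     for table, tuples in table_index_dict.items():
--         pairs = [(column, columns_tuple[1])
--                  for columns_tuple in tuples
--                  for column in columns_tuple[0].split(',')]
--         seen = set()
--         backwards = []
--         for pair in reversed(pairs):
--             if pair not in seen:
--                 seen.add(pair)
--                 backwards.append(pair)
--         query_indexable_columns[table] = backwards[::-1]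
--     return query_indexable_columns
-- ===== Notes on version B (the rewrite author's own statement) =====
-- stated objective: alternative
-- what changed: A removes a matching earlier pair with a linear scan before every append; B builds the flat (column,type) pair list once and dedups it in a single reverse pass with a hash set, reversing the result to restore last-occurrence order.
import Mathlib
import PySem

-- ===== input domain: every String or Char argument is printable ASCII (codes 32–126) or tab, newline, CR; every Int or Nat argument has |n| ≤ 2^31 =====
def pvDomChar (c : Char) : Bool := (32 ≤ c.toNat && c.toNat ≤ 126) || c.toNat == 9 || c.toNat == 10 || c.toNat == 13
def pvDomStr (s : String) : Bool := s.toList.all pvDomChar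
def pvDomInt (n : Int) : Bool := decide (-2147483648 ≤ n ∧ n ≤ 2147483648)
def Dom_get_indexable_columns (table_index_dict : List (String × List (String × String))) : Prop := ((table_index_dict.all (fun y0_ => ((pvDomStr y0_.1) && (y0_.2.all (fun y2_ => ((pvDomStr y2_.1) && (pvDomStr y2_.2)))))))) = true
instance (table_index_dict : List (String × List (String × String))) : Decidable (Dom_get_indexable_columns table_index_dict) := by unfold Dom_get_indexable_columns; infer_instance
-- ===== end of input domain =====

-- B replaces A's scan-and-remove-before-append per-table loop by a single reverse
-- pass with a seen-set followed by a reverse; same return value.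


-- s.split(',') — the separator is the non-empty literal ",", so Python never raises;
-- PySem.Str.split? returns some there and the getD default is never used.
def pvSplit (s : String) : List String := (PySem.Str.split? s ",").getD []

-- ===== PORT A =====
-- A's inner 'for ind, item in enumerate(...): … pop(ind); break': remove the first
-- exact (column, type) match (the scan continues past same-column/other-type items).
def pvARemove (qs : List (String × String)) (p : String × String) : List (String × String) :=
  match qs with
  | [] => []
  | q :: rest => if q = p then rest else q :: pvARemove rest p

-- A's per-table loop: for each columns_tuple, for each column of the split,
-- remove the first equal pair then append it.
def pvATable (tuples : List (String × String)) : List (String × String) :=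
  tuples.foldl (fun qs ct =>
    (pvSplit ct.1).foldl (fun qs col =>
      pvARemove qs (col, ct.2) ++ [(col, ct.2)]) qs) []

def get_indexable_columns (table_index_dict : List (String × List (String × String))) : List (String × List (String × String)) :=
  if table_index_dict.length = 0 then []
  else
    (table_index_dict.foldl (fun d tp => d.insert tp.1 (pvATable tp.2))
      (PySem.Dict.empty : PySem.Dict String (List (String × String)))).items

-- ===== PORT B =====
-- B's per-table pass: flat pair list, reverse pass with a seen set, final reverse.
def pvBTable (tuples : List (String × String)) : List (String × String) :=
  (((tuples.flatMap (fun ct => (pvSplit ct.1).map (fun c => (c, ct.2)))).reverse.foldl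
      (fun st p =>
        if PySem.Set.contains st.1 p then st else (PySem.Set.add st.1 p, st.2 ++ [p]))
      (([] : PySem.Set (String × String)), ([] : List (String × String)))).2).reverse

def get_indexable_columns_alt (table_index_dict : List (String × List (String × String))) : List (String × List (String × String)) :=
  if table_index_dict.length = 0 then []
  else
    (table_index_dict.foldl (fun d tp => d.insert tp.1 (pvBTable tp.2))
      (PySem.Dict.empty : PySem.Dict String (List (String × String)))).items

-- ===== PRECONDITION & SPEC =====
def Spec_get_indexable_columns (table_index_dict : List (String × List (String × String))) (out : List (String × List (String × String))) : Prop := out = get_indexable_columns_alt table_index_dict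
instance (table_index_dict : List (String × List (String × String))) (out : List (String × List (String × String))) : Decidable (Spec_get_indexable_columns table_index_dict out) := by unfold Spec_get_indexable_columns; infer_instance

-- ===== CLAIM (what is proved, stated in full; the proofs are below) =====
def Claim_equal_get_indexable_columns : Prop := ∀ (table_index_dict : List (String × List (String × String))), Dom_get_indexable_columns table_index_dict → Spec_get_indexable_columns table_index_dict (get_indexable_columns table_index_dict)

-- ===== LEMMAS AND PROOFS =====

-- on a duplicate-free list, removing the first occurrence is filtering the value out
theorem pvARemove_eq_filter (qs : List (String × String)) (p : String × String)
    (h : qs.Nodup) : pvARemove qs p = qs.filter (· != p) := by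
  induction qs with
  | nil => rfl
  | cons q rest ih =>
    rcases List.nodup_cons.mp h with ⟨hq, hrest⟩
    by_cases hqp : q = p
    · subst hqp
      simp [pvARemove]
      exact (List.filter_eq_self.mpr (fun x hx => by
        simp [bne_iff_ne]
        rintro rfl; exact hq hx)).symm
    · simp [pvARemove, hqp, bne_iff_ne, ih hrest]

-- A's accumulator step keeps the list duplicate-free
theorem pvG_nodup (qs : List (String × String)) (p : String × String) (h : qs.Nodup) :
    (qs.filter (· != p) ++ [p]).Nodup := by
  refine List.Nodup.append (h.filter _) (List.nodup_singleton p) ?_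
  intro x hx hxp
  rcases List.mem_filter.mp hx with ⟨_, hne⟩
  simp at hxp
  subst hxp
  exact (bne_iff_ne.mp hne) rfl

-- A's fold equals the filter-based fold from any duplicate-free start
theorem pvAfold_eq_gfold (ps : List (String × String)) :
    ∀ acc : List (String × String), acc.Nodup →
    ps.foldl (fun qs p => pvARemove qs p ++ [p]) acc
      = ps.foldl (fun qs p => qs.filter (· != p) ++ [p]) acc := by
  induction ps with
  | nil => intro acc _; rfl
  | cons p ps ih =>
    intro acc hacc
    simp only [List.foldl_cons, pvARemove_eq_filter acc p hacc]
    exact ih _ (pvG_nodup acc p hacc)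

-- adding an element already seen by the whole run can be dropped from the run
theorem pvFoldAdd_filter (xs : List (String × String)) :
    ∀ s : PySem.Set (String × String), ∀ p, p ∈ s →
    xs.foldl PySem.Set.add s = (xs.filter (· != p)).foldl PySem.Set.add s := by
  induction xs with
  | nil => intro s p _; rfl
  | cons x xs ih =>
    intro s p hp
    by_cases hxp : x = p
    · subst hxp
      have : PySem.Set.add s x = s := by
        simp [PySem.Set.add, PySem.Set.contains, hp]
      simp [List.foldl_cons, this, ih s x hp]
    · have hp' : p ∈ PySem.Set.add s x := by
        simp [PySem.Set.add]; split <;> simp [hp]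
      simp [bne_iff_ne, hxp, List.foldl_cons, ih _ p hp']

-- a head element no later element equals floats out of the add-fold
theorem pvFoldAdd_cons (ys : List (String × String)) :
    ∀ (a : String × String) (s : PySem.Set (String × String)),
    (∀ x ∈ ys, x ≠ a) →
    ys.foldl PySem.Set.add (a :: s) = a :: ys.foldl PySem.Set.add s := by
  induction ys with
  | nil => intro a s _; rfl
  | cons y ys ih =>
    intro a s h
    have hya : y ≠ a := h y (List.mem_cons_self)
    have hstep : PySem.Set.add (a :: s) y = a :: PySem.Set.add s y := by
      simp [PySem.Set.add, PySem.Set.contains, hya]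
      split <;> simp
    simp only [List.foldl_cons, hstep]
    exact ih a _ (fun x hx => h x (List.mem_cons_of_mem _ hx))

-- set(xs) with a fresh head: first occurrence stays in front, later copies vanish
theorem pvOfList_cons (p : String × String) (xs : List (String × String)) :
    PySem.Set.ofList (p :: xs) = p :: PySem.Set.ofList (xs.filter (· != p)) := by
  have h0 : PySem.Set.ofList (p :: xs) = xs.foldl PySem.Set.add [p] := by
    simp [PySem.Set.ofList_eq_foldl, PySem.Set.add, PySem.Set.contains]
  rw [h0, pvFoldAdd_filter xs [p] p (List.mem_singleton.mpr rfl),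
      pvFoldAdd_cons _ p []
        (fun x hx => bne_iff_ne.mp (List.mem_filter.mp hx).2),
      PySem.Set.ofList_eq_foldl]

-- building the set commutes with filtering (needed for the (≠ p) filter)
theorem pvOfList_filter (xs : List (String × String)) (q : String × String → Bool) :
    ∀ s : PySem.Set (String × String),
    (xs.foldl PySem.Set.add s).filter q = (xs.filter q).foldl PySem.Set.add (s.filter q) := by
  induction xs with
  | nil => intro s; rfl
  | cons x xs ih =>
    intro s
    by_cases hq : q x = true
    · have hstep : (PySem.Set.add s x).filter q = PySem.Set.add (s.filter q) x := by
        by_cases hm : x ∈ s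
        · have h1 : PySem.Set.add s x = s := by
            simp [PySem.Set.add, PySem.Set.contains, hm]
          have h2 : PySem.Set.add (s.filter q) x = s.filter q := by
            simp [PySem.Set.add, PySem.Set.contains, List.mem_filter, hm, hq]
          rw [h1, h2]
        · have h1 : PySem.Set.add s x = s ++ [x] := by
            simp [PySem.Set.add, PySem.Set.contains, hm]
          have h2 : PySem.Set.add (s.filter q) x = s.filter q ++ [x] := by
            simp [PySem.Set.add, PySem.Set.contains, List.mem_filter, hm]
          rw [h1, h2, List.filter_append, List.filter_cons, if_pos hq, List.filter_nil]
      rw [List.foldl_cons, List.filter_cons, if_pos hq, List.foldl_cons, ih, hstep]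
    · have hstep : (PySem.Set.add s x).filter q = s.filter q := by
        by_cases hm : x ∈ s
        · have h1 : PySem.Set.add s x = s := by
            simp [PySem.Set.add, PySem.Set.contains, hm]
          rw [h1]
        · have h1 : PySem.Set.add s x = s ++ [x] := by
            simp [PySem.Set.add, PySem.Set.contains, hm]
          rw [h1, List.filter_append, List.filter_cons, if_neg hq, List.filter_nil,
              List.append_nil]
      rw [List.foldl_cons, List.filter_cons, if_neg hq, ih, hstep]

-- A's filter-based fold computes last-occurrence dedup = reverse(set-dedup(reverse))
theorem pvGfold_eq_spec (ps : List (String × String)) :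
    ps.foldl (fun qs p => qs.filter (· != p) ++ [p]) []
      = (PySem.Set.ofList ps.reverse).reverse := by
  induction ps using List.reverseRecOn with
  | nil => rfl
  | append_singleton ps p ih =>
    rw [List.foldl_append, List.foldl_cons, List.foldl_nil, ih,
        List.reverse_append, List.reverse_singleton, List.singleton_append,
        pvOfList_cons, List.reverse_cons]
    congr 1
    have h := pvOfList_filter ps.reverse (· != p) []
    simp only [List.filter_nil, ← PySem.Set.ofList_eq_foldl] at h
    rw [List.filter_reverse, h]

-- B's paired fold stays diagonal: seen set and output list are the same list
theorem pvBfold_diag (ps : List (String × String)) :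
    ∀ s : PySem.Set (String × String),
    ps.foldl (fun st p =>
        if PySem.Set.contains st.1 p then st else (PySem.Set.add st.1 p, st.2 ++ [p])) (s, s)
      = (ps.foldl PySem.Set.add s, ps.foldl PySem.Set.add s) := by
  induction ps with
  | nil => intro s; rfl
  | cons p ps ih =>
    intro s
    simp only [List.foldl_cons]
    by_cases hm : p ∈ s
    · have hc : PySem.Set.contains s p = true := by
        simp [PySem.Set.contains, hm]
      have hadd : PySem.Set.add s p = s := by
        simp [PySem.Set.add, PySem.Set.contains, hm]
      rw [if_pos hc, hadd]
      exact ih s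
    · have hc : ¬ PySem.Set.contains s p = true := by
        simp [PySem.Set.contains, hm]
      have hadd : PySem.Set.add s p = s ++ [p] := by
        simp [PySem.Set.add, PySem.Set.contains, hm]
      rw [if_neg hc, hadd]
      exact ih (s ++ [p])

-- per-table: A's scan-and-remove loop and B's reverse pass agree
theorem pvATable_eq_pvBTable (tuples : List (String × String)) :
    pvATable tuples = pvBTable tuples := by
  unfold pvATable pvBTable
  have hA : tuples.foldl (fun qs ct =>
      (pvSplit ct.1).foldl (fun qs col => pvARemove qs (col, ct.2) ++ [(col, ct.2)]) qs) []
      = (tuples.flatMap (fun ct => (pvSplit ct.1).map (fun c => (c, ct.2)))).foldl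
          (fun qs p => pvARemove qs p ++ [p]) [] := by
    rw [List.foldl_flatMap]
    simp only [List.foldl_map]
  rw [hA, pvAfold_eq_gfold _ [] List.nodup_nil, pvGfold_eq_spec, pvBfold_diag,
      PySem.Set.ofList_eq_foldl]

-- ===== VERDICT (by name: the statement is the Claim_ definition above) =====
theorem get_indexable_columns_spec : Claim_equal_get_indexable_columns := by
  intro tidd _
  unfold Spec_get_indexable_columns get_indexable_columns get_indexable_columns_alt
  simp only [pvATable_eq_pvBTable]
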